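-- pv_equiv track=rewrite | github.com/zt-yang/pybullet_planning | pigi_tools/data_utils.py | get_old_actions
-- ===== SOURCE A (Python) =====
-- def get_old_actions(skeletons):
--     actions = []
--     for skeleton in skeletons:
--         aa = [a+')' for a in skeleton.split(')')[:-1]]
--         for a in aa:
--             if a not in actions:
--                 actions.append(a)
--     actions.sort()
--     return actions
-- ===== SOURCE B (Python) =====
-- def get_old_actions(skeletons):
--     all_actions = []
--     for skeleton in skeletons:
--         for a in skeleton.split(')')[:-1]:
--             all_actions.append(a + ')')
--     all_actions.sort()
--     out = []
--     for a in all_actions: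
--         if not out or out[-1] != a:
--             out.append(a)
--     return out
-- ===== Notes on version B (the rewrite author's own statement) =====
-- stated objective: alternative
-- what changed: B replaces A's membership-checked incremental dedup followed by a sort with a different pipeline: collect all pieces with duplicates in one pass, sort once, then remove adjacent duplicates in a single linear scan.
import Mathlib
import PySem

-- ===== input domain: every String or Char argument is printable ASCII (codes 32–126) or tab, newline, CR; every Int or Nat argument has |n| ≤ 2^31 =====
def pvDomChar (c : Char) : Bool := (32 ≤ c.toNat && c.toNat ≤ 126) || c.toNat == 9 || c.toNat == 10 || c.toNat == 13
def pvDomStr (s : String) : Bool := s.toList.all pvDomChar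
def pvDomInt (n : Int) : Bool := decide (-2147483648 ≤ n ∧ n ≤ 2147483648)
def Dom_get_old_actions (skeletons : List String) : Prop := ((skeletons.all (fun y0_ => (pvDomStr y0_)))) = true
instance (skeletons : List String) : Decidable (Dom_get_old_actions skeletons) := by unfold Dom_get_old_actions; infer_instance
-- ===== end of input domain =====

-- B collects every action string first (duplicates included), sorts once, then removes adjacent
-- duplicates in one linear pass, instead of A's membership-checked incremental dedup before the
-- sort; same sorted-unique return value.

-- ===== PORT A =====
-- shared helper: [a+')' for a in skeleton.split(')')[:-1]]  (this comprehension appears verbatim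
-- in A and as a loop in B); split(')') on code points, [:-1] is PySem slice to -1
def pvPieces (skeleton : String) : List String :=
  (PySem.List.slice (PySem.Chars.splitOn skeleton.toList [')']) none (some (-1))).map
    (fun a => String.ofList (a ++ [')']))

def get_old_actions (skeletons : List String) : List String :=
  let actions := skeletons.foldl
    (fun actions skeleton =>
      (pvPieces skeleton).foldl
        (fun actions a => if a ∈ actions then actions else actions ++ [a]) actions)
    []
  PySem.List.sorted actions (fun x => x)

-- ===== PORT B =====
def get_old_actions_alt (skeletons : List String) : List String :=
  let all_actions := skeletons.foldl (fun acc skeleton => acc ++ pvPieces skeleton) []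
  let srt := PySem.List.sorted all_actions (fun x => x)
  -- 'if not out or out[-1] != a' ⟺ the last element of out is not a ⟺ out.getLast? ≠ some a
  srt.foldl (fun out a => if out.getLast? = some a then out else out ++ [a]) []

-- ===== PRECONDITION & SPEC =====
def Spec_get_old_actions (skeletons : List String) (out : List String) : Prop := out = get_old_actions_alt skeletons
instance (skeletons : List String) (out : List String) : Decidable (Spec_get_old_actions skeletons out) := by unfold Spec_get_old_actions; infer_instance

-- ===== CLAIM (what is proved, stated in full; the proofs are below) =====
def Claim_equal_get_old_actions : Prop := ∀ (skeletons : List String), Dom_get_old_actions skeletons → Spec_get_old_actions skeletons (get_old_actions skeletons)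

-- ===== LEMMAS AND PROOFS =====

-- folding over a flattened list is the nested fold A performs
theorem pv_foldl_flatMap {α β γ : Type} (g : α → List β) (f : γ → β → γ)
    (l : List α) (init : γ) :
    (l.flatMap g).foldl f init = l.foldl (fun acc x => (g x).foldl f acc) init := by
  induction l generalizing init with
  | nil => rfl
  | cons a t ih => simp [List.flatMap_cons, List.foldl_append, ih]

-- A's membership-dedup fold: result is duplicate-free and holds exactly acc ∪ l
theorem pv_dedup_fold (l acc : List String) (h : acc.Nodup) :
    (l.foldl (fun actions a => if a ∈ actions then actions else actions ++ [a]) acc).Nodup ∧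
    ∀ x, x ∈ l.foldl (fun actions a => if a ∈ actions then actions else actions ++ [a]) acc ↔
      x ∈ acc ∨ x ∈ l := by
  induction l generalizing acc with
  | nil => simp [h]
  | cons a t ih =>
    by_cases ha : a ∈ acc
    · have := ih acc h
      simp only [List.foldl_cons, if_pos ha]
      refine ⟨this.1, fun x => ?_⟩
      rw [(this.2 x)]
      simp only [List.mem_cons]
      constructor
      · tauto
      · rintro (hx | rfl | hx) <;> tauto
    · have hacc' : (acc ++ [a]).Nodup := by
        refine List.Nodup.append h (List.nodup_singleton a) ?_
        intro y hy hz
        simp at hz; subst hz; exact ha hy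
      have := ih (acc ++ [a]) hacc'
      simp only [List.foldl_cons, if_neg ha]
      refine ⟨this.1, fun x => ?_⟩
      rw [(this.2 x)]
      simp only [List.mem_append, List.mem_cons]
      tauto

-- in a strictly increasing list every element bounded above by all elements is the last one
theorem pv_last_of_max (res : List String) (a : String)
    (hp : res.Pairwise (· < ·)) (hmem : a ∈ res) (hub : ∀ y ∈ res, y ≤ a) :
    res.getLast? = some a := by
  induction res with
  | nil => cases hmem
  | cons b rest ih =>
    cases rest with
    | nil =>
      simp at hmem; simp [hmem]
    | cons c r =>
      have hbc : b < c := (List.pairwise_cons.mp hp).1 c (by simp)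
      have hmem' : a ∈ c :: r := by
        rcases List.mem_cons.mp hmem with rfl | hx
        · exact absurd (hub c (by simp)) (not_le.mpr hbc)
        · exact hx
      have := ih (List.pairwise_cons.mp hp).2 hmem'
        (fun y hy => hub y (List.mem_cons_of_mem _ hy))
      simpa [List.getLast?_cons_cons] using this

-- B's adjacent-dedup fold over a ≤-sorted list: strictly increasing, same elements
theorem pv_adj_fold (s res : List String)
    (hres : res.Pairwise (· < ·)) (hs : s.Pairwise (· ≤ ·))
    (hle : ∀ x ∈ res, ∀ y ∈ s, x ≤ y) :
    (s.foldl (fun out a => if out.getLast? = some a then out else out ++ [a]) res).Pairwise (· < ·) ∧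
    ∀ x, x ∈ s.foldl (fun out a => if out.getLast? = some a then out else out ++ [a]) res ↔
      x ∈ res ∨ x ∈ s := by
  induction s generalizing res with
  | nil => exact ⟨hres, fun x => by simp⟩
  | cons a t ih =>
    have hat : ∀ y ∈ t, a ≤ y := (List.pairwise_cons.mp hs).1
    have ht : t.Pairwise (· ≤ ·) := (List.pairwise_cons.mp hs).2
    by_cases hl : res.getLast? = some a
    · have hamem : a ∈ res := List.mem_of_getLast? hl
      have := ih res hres ht
        (fun x hx y hy => le_trans (hle x hx a (by simp)) (hat y hy))
      simp only [List.foldl_cons, if_pos hl]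
      refine ⟨this.1, fun x => ?_⟩
      rw [this.2 x]
      simp only [List.mem_cons]
      constructor
      · tauto
      · rintro (hx | rfl | hx) <;> tauto
    · have hlt : ∀ x ∈ res, x < a := by
        intro x hx
        rcases lt_or_eq_of_le (hle x hx a (by simp)) with h | rfl
        · exact h
        · exact absurd (pv_last_of_max res x hres hx
            (fun y hy => hle y hy x (by simp))) hl
      have hres' : (res ++ [a]).Pairwise (· < ·) := by
        rw [List.pairwise_append]
        exact ⟨hres, by simp, by simpa using hlt⟩
      have hle' : ∀ x ∈ res ++ [a], ∀ y ∈ t, x ≤ y := by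
        intro x hx y hy
        rcases List.mem_append.mp hx with hx | hx
        · exact le_trans (hle x hx a (by simp)) (hat y hy)
        · simp at hx; subst hx; exact hat y hy
      have := ih (res ++ [a]) hres' ht hle'
      simp only [List.foldl_cons, if_neg hl]
      refine ⟨this.1, fun x => ?_⟩
      rw [this.2 x]
      simp only [List.mem_append, List.mem_cons]
      tauto

-- ===== VERDICT (by name: the statement is the Claim_ definition above) =====
theorem get_old_actions_spec : Claim_equal_get_old_actions := by
  intro skeletons _
  unfold Spec_get_old_actions get_old_actions get_old_actions_alt
  simp only []
  set L : List String := skeletons.flatMap pvPieces with hL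
  -- A's accumulated list is the nested dedup fold over all pieces
  have hAfold : skeletons.foldl
      (fun actions skeleton =>
        (pvPieces skeleton).foldl
          (fun actions a => if a ∈ actions then actions else actions ++ [a]) actions) [] =
      L.foldl (fun actions a => if a ∈ actions then actions else actions ++ [a]) [] := by
    rw [hL, pv_foldl_flatMap]
  have hBall : skeletons.foldl (fun acc skeleton => acc ++ pvPieces skeleton) [] = L := by
    rw [hL, PySem.List.foldl_append_eq_flatMap]; simp
  rw [hAfold, hBall]
  set dd := L.foldl (fun actions a => if a ∈ actions then actions else actions ++ [a]) [] with hdd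
  set srt := PySem.List.sorted L (fun x => x) with hsrt
  set ys := srt.foldl (fun out a => if out.getLast? = some a then out else out ++ [a]) [] with hys
  have hddP := pv_dedup_fold L [] (by simp)
  have hsorted : srt.Pairwise (· ≤ ·) := by
    simpa using PySem.List.sorted_pairwise L (fun x => x)
  have hysP := pv_adj_fold srt [] (by simp) hsorted (by simp)
  have hysPW : ys.Pairwise (· < ·) := hysP.1
  have hysMem : ∀ x, x ∈ ys ↔ x ∈ L := by
    intro x
    rw [hys] at *
    rw [hysP.2 x, hsrt]
    simp [PySem.List.mem_sorted]
  have hysNd : ys.Nodup := hysPW.imp (fun {a b} h => ne_of_lt h)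
  have hperm : ys.Perm dd := by
    rw [List.perm_ext_iff_of_nodup hysNd hddP.1]
    intro x
    rw [hysMem x, hddP.2 x]
    simp
  exact PySem.List.sorted_eq_of_perm_of_pairwise_lt dd ys (fun x => x) hperm
    (by exact hysPW)
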